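-- pv_equiv track=rewrite | github.com/maikyonn/aria-structure-DiT | utils.py | relative_label_sequence
-- ===== SOURCE A (Python) =====
-- from typing import Iterable, List, Sequence, Tuple, Optional, Union
--
-- def relative_label_sequence(labels: Iterable[str]) -> List[str]:
--     mapping = {}
--     next_ord = ord("A")
--     rel = []
--     for lab in labels:
--         if lab not in mapping:
--             mapping[lab] = chr(next_ord)
--             next_ord += 1
--         rel.append(mapping[lab])
--     return rel
-- ===== SOURCE B (Python) =====
-- def relative_label_sequence(labels):
--     labels = list(labels)
--     return [chr(ord("A") + len(set(labels[:labels.index(lab)]))) for lab in labels]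
-- ===== Notes on version B (the rewrite author's own statement) =====
-- stated objective: alternative
-- what changed: Drops the incrementally grown dict entirely: each label's letter is computed independently as ord('A') plus the number of distinct labels occurring strictly before its first occurrence (set of a prefix slice), trading the O(n) mapping for an O(n^2) dict-free counting formulation.
import Mathlib
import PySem

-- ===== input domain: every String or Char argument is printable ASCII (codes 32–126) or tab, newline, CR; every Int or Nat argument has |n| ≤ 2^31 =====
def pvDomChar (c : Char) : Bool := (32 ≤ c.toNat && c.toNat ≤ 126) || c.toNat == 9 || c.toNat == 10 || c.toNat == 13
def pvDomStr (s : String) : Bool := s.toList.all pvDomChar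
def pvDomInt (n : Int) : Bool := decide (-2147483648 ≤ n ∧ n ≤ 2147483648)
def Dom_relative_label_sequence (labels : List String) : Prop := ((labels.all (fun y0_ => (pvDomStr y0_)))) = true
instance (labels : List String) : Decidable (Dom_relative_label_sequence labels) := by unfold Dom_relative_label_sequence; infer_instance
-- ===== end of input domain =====

-- B drops A's incrementally grown dict entirely: each label's letter is computed independently
-- as 'A' plus the number of distinct labels strictly before its first occurrence (set of a prefix
-- slice) — a dict-free O(n^2) counting formulation of the same value.

-- ===== PORT A =====
-- the 'for lab in labels' loop with state (mapping, next_ord, rel)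
def relA_go : List String → PySem.Dict String String → Int → List String → List String
  | [], _, _, rel => rel
  | lab :: rest, mapping, next_ord, rel =>
    if mapping.contains lab then
      relA_go rest mapping next_ord (rel ++ [(mapping.get? lab).getD ""])
    else
      let mapping' := mapping.insert lab (String.mk [Char.ofNat next_ord.toNat])
      relA_go rest mapping' (next_ord + 1) (rel ++ [(mapping'.get? lab).getD ""])

def relative_label_sequence (labels : List String) : List String :=
  relA_go labels PySem.Dict.empty 65 []

-- ===== PORT B =====
-- [chr(ord("A") + len(set(labels[:labels.index(lab)]))) for lab in labels]
-- (labels.index(lab) never raises: lab is drawn from labels, so .getD 0 is never taken)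
def relative_label_sequence_alt (labels : List String) : List String :=
  labels.map (fun lab =>
    let i : Nat := (PySem.List.index? labels lab).getD 0
    String.mk [Char.ofNat
      ((65 + PySem.Set.len (PySem.Set.ofList (PySem.List.slice labels none (some (i : Int))))).toNat)])

-- ===== PRECONDITION & SPEC =====
def Spec_relative_label_sequence (labels : List String) (out : List String) : Prop := out = relative_label_sequence_alt labels
instance (labels : List String) (out : List String) : Decidable (Spec_relative_label_sequence labels out) := by unfold Spec_relative_label_sequence; infer_instance

-- ===== CLAIM (what is proved, stated in full; the proofs are below) =====
def Claim_equal_relative_label_sequence : Prop := ∀ (labels : List String), Dom_relative_label_sequence labels → Spec_relative_label_sequence labels (relative_label_sequence labels)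

-- ===== LEMMAS AND PROOFS =====

-- the letter assigned to first-seen index n
def pvLetter (n : Nat) : String := String.mk [Char.ofNat (65 + n)]

theorem pvLetter_cast (n : Nat) : String.mk [Char.ofNat (65 + (n : Int)).toNat] = pvLetter n := by
  have h : ((65 : Int) + (n : Int)).toNat = 65 + n := by omega
  rw [pvLetter, h]

-- the common reference value: each label mapped by its index in the first-seen dedup
def pvCanon (labels : List String) : List String :=
  labels.map (fun l => pvLetter ((PySem.List.dedup labels).idxOf l))

theorem pvA_go_spec (rest : List String) :
    ∀ (s : List String) (mapping : PySem.Dict String String) (rel : List String),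
      s.Nodup →
      (∀ l, mapping.get? l = if l ∈ s then some (pvLetter (s.idxOf l)) else none) →
      relA_go rest mapping (65 + (s.length : Int)) rel
        = rel ++ rest.map (fun l => pvLetter ((PySem.Set.update s rest).idxOf l)) := by
  induction rest with
  | nil => intro s mapping rel _ _; simp [relA_go]
  | cons lab t ih =>
    intro s mapping rel hnd hinv
    have hcont : mapping.contains lab = decide (lab ∈ s) := by
      rw [PySem.Dict.contains_eq_isSome_get?, hinv lab]
      by_cases h : lab ∈ s <;> simp [h]
    by_cases hm : lab ∈ s
    · -- seen before: mapping and next_ord unchanged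
      have hpre : PySem.Set.update s t = s ++ ((PySem.Set.ofList t).filter (fun y => !(PySem.Set.contains s y))) :=
        PySem.Set.update_eq_append_filter s t
      have hidx : (PySem.Set.update s t).idxOf lab = s.idxOf lab := by
        rw [hpre]; exact List.idxOf_append_of_mem hm
      rw [relA_go, if_pos (by simp [hcont, hm]), ih s mapping _ hnd hinv]
      simp [PySem.Set.update_cons, hinv lab, hm, hidx]
    · -- new label
      have hval : String.mk [Char.ofNat (65 + (s.length : Int)).toNat] = pvLetter s.length :=
        pvLetter_cast s.length
      have hidxnew : ∀ u : List String, (s ++ [lab] ++ u).idxOf lab = s.length := by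
        intro u
        rw [List.append_assoc, List.idxOf_append_of_notMem hm]
        simp
      have h0 : (s ++ [lab]).idxOf lab = s.length := by simpa using hidxnew []
      have hinv' : ∀ l, (mapping.insert lab (String.mk [Char.ofNat (65 + (s.length : Int)).toNat])).get? l
          = if l ∈ s ++ [lab] then some (pvLetter ((s ++ [lab]).idxOf l)) else none := by
        intro l
        rw [PySem.Dict.get?_insert]
        by_cases he : l = lab
        · rw [if_pos he, he, if_pos (by simp), h0, hval]
        · rw [if_neg he, hinv l]
          by_cases hls : l ∈ s
          · simp [hls, List.idxOf_append_of_mem hls, he]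
          · simp [hls, he]
      have hnd' : (s ++ [lab]).Nodup := by
        have hdisj : ∀ a ∈ s, ∀ b ∈ [lab], a ≠ b := by
          intro a ha b hb
          rw [List.mem_singleton] at hb
          subst hb
          exact fun h => hm (h ▸ ha)
        exact (List.nodup_append).mpr ⟨hnd, List.nodup_singleton _, hdisj⟩
      have hcast : 65 + (s.length : Int) + 1 = 65 + (((s ++ [lab]).length : Nat) : Int) := by
        simp; ring
      have hupd : PySem.Set.update s (lab :: t) = PySem.Set.update (s ++ [lab]) t := by
        rw [PySem.Set.update_cons, PySem.Set.add_of_not_mem hm]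
      have hpre : PySem.Set.update (s ++ [lab]) t
          = (s ++ [lab]) ++ ((PySem.Set.ofList t).filter (fun y => !(PySem.Set.contains (s ++ [lab]) y))) :=
        PySem.Set.update_eq_append_filter _ t
      have hidxlab : (PySem.Set.update (s ++ [lab]) t).idxOf lab = s.length := by
        rw [hpre]; exact hidxnew _
      rw [relA_go, if_neg (by simp [hcont, hm]), hcast,
        ih (s ++ [lab]) _ _ hnd' hinv']
      simp [hupd, hidxlab, hval]

theorem pvA_eq_canon (labels : List String) : relative_label_sequence labels = pvCanon labels := by
  have h := pvA_go_spec labels [] PySem.Dict.empty [] (by simp)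
    (by intro l; simp [PySem.Dict.get?_empty])
  simp only [List.length_nil, Nat.cast_zero, add_zero] at h
  rw [relative_label_sequence, h]
  simp [pvCanon, PySem.Set.update_nil_left, PySem.List.dedup_eq_ofList]

theorem pvB_eq_canon (labels : List String) : relative_label_sequence_alt labels = pvCanon labels := by
  rw [relative_label_sequence_alt, pvCanon]
  apply List.map_congr_left
  intro lab hlab
  -- first occurrence: labels = pre ++ lab :: suf with lab ∉ pre
  have hsome : (PySem.List.index? labels lab).isSome := (PySem.List.index?_isSome_iff _ _).mpr hlab
  obtain ⟨k, hk⟩ := Option.isSome_iff_exists.mp hsome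
  obtain ⟨pre, suf, hsplit, hlen, hnotm⟩ := (PySem.List.index?_eq_some_iff _ _ _).mp hk
  have hgetD : (PySem.List.index? labels lab).getD 0 = k := by rw [hk]; rfl
  -- the sliced prefix is pre
  have hslice : PySem.List.slice labels none (some ((k : Nat) : Int)) = pre := by
    rw [PySem.List.slice_to_natCast, hsplit, ← hlen, List.take_left]
  -- B's count = |set(pre)|
  have hlab_not_ofList : lab ∉ PySem.Set.ofList pre := fun h =>
    hnotm ((PySem.Set.mem_ofList _ _).mp h)
  -- A's dedup index of lab = |set(pre)|
  have hidx : (PySem.List.dedup labels).idxOf lab = (PySem.Set.ofList pre).length := by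
    rw [PySem.List.dedup_eq_ofList, hsplit]
    rw [PySem.Set.ofList_append, PySem.Set.update_cons,
      PySem.Set.add_of_not_mem hlab_not_ofList,
      PySem.Set.update_eq_append_filter, List.append_assoc,
      List.idxOf_append_of_notMem hlab_not_ofList]
    simp
  show String.mk [Char.ofNat ((65 + PySem.Set.len (PySem.Set.ofList (PySem.List.slice labels none
      (some (((PySem.List.index? labels lab).getD 0 : Nat) : Int))))).toNat)]
    = pvLetter ((PySem.List.dedup labels).idxOf lab)
  rw [hgetD, hslice, hidx, PySem.Set.len]
  exact pvLetter_cast _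

-- ===== VERDICT (by name: the statement is the Claim_ definition above) =====
theorem relative_label_sequence_spec : Claim_equal_relative_label_sequence := by
  intro labels _
  unfold Spec_relative_label_sequence
  rw [pvA_eq_canon, pvB_eq_canon]
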